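-- pv_equiv track=rewrite | github.com/JorgeIba/Competitive-Programming-Problems | ICPC México 2020 - Repechaje/F.py | adyacentes
-- ===== SOURCE A (Python) =====
-- def adyacentes(n): ## (i, j) -- (k, l)
--   ans = 0
--   for i in range(0,n):
--     for j in range(0,n):
--       for k in range(n, 2*n):
--         for l in range(0, n):
--           ans += abs(i-k)  + abs(j-l)
--   return ans//2
-- ===== SOURCE B (Python) =====
-- def adyacentes(n):
--     # closed form: separate the Manhattan sum into horizontal and vertical parts and sum each in closed form
--     if n <= 0:
--         return 0
--     return n ** 3 * (4 * n * n - 1) // 6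
-- ===== Notes on version B (the rewrite author's own statement) =====
-- stated objective: faster
-- what changed: Replaced the four nested loops by a constant-time closed-form polynomial, obtained by separating the Manhattan sum into its horizontal and vertical parts.
import Mathlib
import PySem

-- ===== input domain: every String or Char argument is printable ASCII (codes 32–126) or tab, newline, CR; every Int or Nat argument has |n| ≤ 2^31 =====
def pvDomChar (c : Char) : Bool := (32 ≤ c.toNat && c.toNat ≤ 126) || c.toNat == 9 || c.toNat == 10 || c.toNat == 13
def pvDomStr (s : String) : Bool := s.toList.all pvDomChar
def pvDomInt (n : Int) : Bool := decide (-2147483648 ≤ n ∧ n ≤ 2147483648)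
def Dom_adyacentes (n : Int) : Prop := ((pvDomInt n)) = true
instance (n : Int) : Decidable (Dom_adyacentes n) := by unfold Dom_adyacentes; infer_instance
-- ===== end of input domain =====

-- B replaces A's four nested loops by a constant-time closed-form polynomial (objective: faster).

-- ===== PORT A =====
def adyacentes (n : Int) : Int :=
  PySem.Int.floordiv
    ((PySem.List.pyRange 0 n 1).foldl (fun ans i =>
      (PySem.List.pyRange 0 n 1).foldl (fun ans j =>
        (PySem.List.pyRange n (2*n) 1).foldl (fun ans k =>
          (PySem.List.pyRange 0 n 1).foldl (fun ans l =>
            ans + (|i - k| + |j - l|)) ans) ans) ans) 0) 2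

-- ===== PORT B =====
def adyacentes_alt (n : Int) : Int :=
  if n ≤ 0 then 0 else PySem.Int.floordiv (n^3 * (4*n*n - 1)) 6

-- ===== PRECONDITION & SPEC =====
def Spec_adyacentes (n : Int) (out : Int) : Prop := out = adyacentes_alt n
instance (n : Int) (out : Int) : Decidable (Spec_adyacentes n out) := by unfold Spec_adyacentes; infer_instance

-- ===== CLAIM (what is proved, stated in full; the proofs are below) =====
def Claim_equal_adyacentes : Prop := ∀ (n : Int), Dom_adyacentes n → Spec_adyacentes n (adyacentes n)

-- ===== LEMMAS AND PROOFS =====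

-- (List.range m).map / .sum is the Finset.range sum (definitional)
lemma pvSumRange (f : ℕ → ℤ) (m : ℕ) : ((List.range m).map f).sum = ∑ i ∈ Finset.range m, f i := rfl

lemma pvGauss (m : ℕ) : (∑ i ∈ Finset.range m, (i:ℤ)) * 2 = m * (m - 1) := by
  induction m with
  | zero => simp
  | succ m ih => rw [Finset.sum_range_succ]; push_cast; push_cast at ih; ring_nf; ring_nf at ih; omega

lemma pvSumSub (m : ℕ) : 2 * ∑ j ∈ Finset.range m, ((m:ℤ) - j) = m^2 + m := by
  rw [Finset.sum_sub_distrib, Finset.sum_const, Finset.card_range, nsmul_eq_mul]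
  have := pvGauss m
  nlinarith [this]

-- 3 · Σ_{j,l<m} |j-l| = m³ - m
lemma pvT3 (m : ℕ) : 3 * ∑ j ∈ Finset.range m, ∑ l ∈ Finset.range m, |(j:ℤ) - l| = m^3 - m := by
  induction m with
  | zero => simp
  | succ m ih =>
    have hout : ∑ j ∈ Finset.range (m+1), ∑ l ∈ Finset.range (m+1), |(j:ℤ) - l|
        = (∑ j ∈ Finset.range m, ∑ l ∈ Finset.range m, |(j:ℤ) - l|)
          + (∑ j ∈ Finset.range m, ((m:ℤ) - j)) + (∑ l ∈ Finset.range m, ((m:ℤ) - l)) := by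
      rw [Finset.sum_range_succ]
      have h1 : ∀ j ∈ Finset.range m, ∑ l ∈ Finset.range (m+1), |(j:ℤ) - l|
          = (∑ l ∈ Finset.range m, |(j:ℤ) - l|) + ((m:ℤ) - j) := by
        intro j hj
        rw [Finset.sum_range_succ]
        have : (j:ℤ) ≤ m := by exact_mod_cast Nat.le_of_lt (Finset.mem_range.mp hj)
        rw [abs_of_nonpos (by omega)]; ring
      rw [Finset.sum_congr rfl h1, Finset.sum_add_distrib]
      have h2 : ∑ l ∈ Finset.range (m+1), |(m:ℤ) - l|
          = ∑ l ∈ Finset.range m, ((m:ℤ) - l) := by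
        rw [Finset.sum_range_succ]
        have h3 : ∀ l ∈ Finset.range m, |(m:ℤ) - l| = (m:ℤ) - l := by
          intro l hl
          have : (l:ℤ) < m := by exact_mod_cast Finset.mem_range.mp hl
          exact abs_of_nonneg (by omega)
        rw [Finset.sum_congr rfl h3]; simp
      rw [h2]
    rw [hout]
    have := pvSumSub m
    push_cast
    nlinarith [ih, this]

-- Σ_{i,k<m} (n + k - i) = n³ when m = n
lemma pvA3 (n : ℤ) (m : ℕ) (h : (m:ℤ) = n) :
    ∑ i ∈ Finset.range m, ∑ k ∈ Finset.range m, ((n:ℤ) + k - i) = n^3 := by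
  subst h
  simp only [Finset.sum_sub_distrib, Finset.sum_add_distrib, Finset.sum_const, Finset.card_range,
    nsmul_eq_mul, Finset.mul_sum]
  ring

-- Σ_{x,y<m} (f x + g y) separates
lemma pvPairSplit (m : ℕ) (f g : ℕ → ℤ) :
    ∑ x ∈ Finset.range m, ∑ y ∈ Finset.range m, (f x + g y)
      = m * (∑ x ∈ Finset.range m, f x) + m * (∑ y ∈ Finset.range m, g y) := by
  simp only [Finset.sum_add_distrib, Finset.sum_const, Finset.card_range, nsmul_eq_mul,
    Finset.mul_sum]

lemma pvMainPos (n : Int) (h : 0 < n) : adyacentes n = adyacentes_alt n := by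
  have hm : ((n:Int) - 0).toNat = n.toNat := by omega
  have h2 : 2*n - n = n := by ring
  set m := n.toNat with hmdef
  have hmn : (m:ℤ) = n := by omega
  unfold adyacentes adyacentes_alt
  rw [if_neg (by omega)]
  simp only [PySem.List.foldl_add, PySem.List.pyRange_one, h2, hm, List.map_map, pvSumRange,
    zero_add, Function.comp]
  simp only [← hmdef]
  have habs : ∀ i ∈ Finset.range m, ∀ k ∈ Finset.range m, |(i:ℤ) - (n + k)| = n + k - i := by
    intro i hi k hk
    have : (i:ℤ) < m := by exact_mod_cast Finset.mem_range.mp hi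
    have hk0 : (0:ℤ) ≤ k := by positivity
    rw [abs_of_nonpos (by omega)]; ring
  have key : (∑ i ∈ Finset.range m, ∑ j ∈ Finset.range m, ∑ k ∈ Finset.range m,
        ∑ l ∈ Finset.range m, (|(i:ℤ) - (n + k)| + |(j:ℤ) - l|))
      = m * (m * n^3) + m * (m * (∑ j ∈ Finset.range m, ∑ l ∈ Finset.range m, |(j:ℤ) - l|)) := by
    calc (∑ i ∈ Finset.range m, ∑ j ∈ Finset.range m, ∑ k ∈ Finset.range m,
          ∑ l ∈ Finset.range m, (|(i:ℤ) - (n + k)| + |(j:ℤ) - l|))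
        = ∑ i ∈ Finset.range m, ∑ j ∈ Finset.range m,
            ((m:ℤ) * (∑ k ∈ Finset.range m, ((n:ℤ) + k - i))
              + (m:ℤ) * (∑ l ∈ Finset.range m, |(j:ℤ) - l|)) := by
          refine Finset.sum_congr rfl (fun i hi => Finset.sum_congr rfl (fun j hj => ?_))
          rw [← pvPairSplit m (fun k => (n:ℤ) + k - i) (fun l => |(j:ℤ) - l|)]
          refine Finset.sum_congr rfl (fun k hk => Finset.sum_congr rfl (fun l hl => ?_))
          rw [habs i hi k hk]
      _ = (m:ℤ) * (∑ i ∈ Finset.range m, (m:ℤ) * ∑ k ∈ Finset.range m, ((n:ℤ) + k - i))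
            + (m:ℤ) * (∑ j ∈ Finset.range m, (m:ℤ) * ∑ l ∈ Finset.range m, |(j:ℤ) - l|) :=
          pvPairSplit m _ _
      _ = m * (m * n^3) + m * (m * (∑ j ∈ Finset.range m, ∑ l ∈ Finset.range m, |(j:ℤ) - l|)) := by
          rw [← Finset.mul_sum, ← Finset.mul_sum, pvA3 n m hmn]
  rw [key]
  have hT := pvT3 m
  rw [hmn] at hT ⊢
  set T := ∑ j ∈ Finset.range m, ∑ l ∈ Finset.range m, |(j:ℤ) - l| with hTdef
  have h3S : n^3 * (4*n*n - 1) = 3 * (n * (n * n^3) + n * (n * T)) := by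
    linear_combination (-(n^2)) * hT
  rw [PySem.Int.floordiv_eq_ediv_of_pos (by norm_num), PySem.Int.floordiv_eq_ediv_of_pos (by norm_num),
    h3S, show (6:ℤ) = 3*2 from rfl, Int.mul_ediv_mul_of_pos _ _ (by norm_num)]

-- ===== VERDICT (by name: the statement is the Claim_ definition above) =====
theorem adyacentes_spec : Claim_equal_adyacentes := by
  intro n _
  unfold Spec_adyacentes
  by_cases h : 0 < n
  · exact pvMainPos n h
  · unfold adyacentes adyacentes_alt
    rw [PySem.List.pyRange_one_eq_nil (by omega), if_pos (by omega)]
    rfl
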